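-- pv_equiv track=rewrite | github.com/jrober84/parsityper | parsityper/reducer.py | create_alignment
-- ===== SOURCE A (Python) =====
-- def create_alignment(ref_lookup,ref_id,ref_seq,seqs,valid_positions,n_threads=1):
--     aln = {ref_id:ref_seq.upper()}
--     ref_len = len(ref_seq)
--     for seq_id in seqs:
--         seq = seqs[seq_id]
--         aln_seq = ['-'] * ref_len
--         for i in range(0,len(seq)):
--             base = seq[i]
--             if i not in valid_positions:
--                 continue
--             mapped_aln_pos = ref_lookup[i]['mapped_aln_pos']
--
--             if mapped_aln_pos == -1:
--                 continue
--             aln_seq[mapped_aln_pos] = base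
--         aln[seq_id] = ''.join(aln_seq)
--
--     return aln
-- ===== SOURCE B (Python) =====
-- def _aligned_row(ref_lookup, positions, seq, ref_len):
--     cells = ['-'] * ref_len
--     n = len(seq)
--     for i in positions:
--         if i >= n:
--             break
--         if i >= 0:
--             m = ref_lookup[i]['mapped_aln_pos']
--             if m != -1:
--                 cells[m] = seq[i]
--     return ''.join(cells)
--
-- def create_alignment(ref_lookup, ref_id, ref_seq, seqs, valid_positions, n_threads=1):
--     positions = sorted(set(valid_positions))
--     aln = {ref_id: ref_seq.upper()}
--     for seq_id in seqs:
--         aln[seq_id] = _aligned_row(ref_lookup, positions, seqs[seq_id], len(ref_seq))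
--     return aln
-- ===== Notes on version B (the rewrite author's own statement) =====
-- stated objective: alternative
-- what changed: The inner loop is inverted: instead of walking every character of each sequence and testing each index against valid_positions, B sorts the deduplicated valid positions once up front and walks only those per sequence, breaking at the first position past the sequence end; per-row assembly is factored into a helper. Pre_ excludes exactly the inputs where A raises (a missing ref_lookup entry or an out-of-range mapped position at a used index).
import Mathlib
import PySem

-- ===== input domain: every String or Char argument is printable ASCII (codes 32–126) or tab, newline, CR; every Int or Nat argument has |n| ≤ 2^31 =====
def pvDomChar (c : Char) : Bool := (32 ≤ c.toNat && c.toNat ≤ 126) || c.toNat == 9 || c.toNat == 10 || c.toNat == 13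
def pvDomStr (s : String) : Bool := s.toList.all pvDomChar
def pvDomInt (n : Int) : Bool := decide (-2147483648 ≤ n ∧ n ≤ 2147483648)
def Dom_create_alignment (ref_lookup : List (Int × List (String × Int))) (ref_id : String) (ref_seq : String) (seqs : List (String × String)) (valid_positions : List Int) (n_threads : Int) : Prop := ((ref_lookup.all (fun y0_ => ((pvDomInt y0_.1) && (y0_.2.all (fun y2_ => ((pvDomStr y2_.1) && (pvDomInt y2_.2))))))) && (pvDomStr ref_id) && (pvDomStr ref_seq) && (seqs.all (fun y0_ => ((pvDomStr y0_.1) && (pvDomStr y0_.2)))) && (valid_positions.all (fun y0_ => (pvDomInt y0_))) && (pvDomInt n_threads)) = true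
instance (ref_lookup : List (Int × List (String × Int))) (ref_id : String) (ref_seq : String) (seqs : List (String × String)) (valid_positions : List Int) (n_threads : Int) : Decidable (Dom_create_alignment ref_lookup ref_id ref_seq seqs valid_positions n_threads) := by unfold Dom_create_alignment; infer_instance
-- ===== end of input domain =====

-- B inverts the inner traversal: instead of walking every character of the sequence and
-- testing each index for membership in valid_positions, it sorts the (deduplicated) valid
-- positions once up front and walks only those, breaking at the first position past the
-- end of the sequence; per-row assembly is factored into a helper. Same return value
-- wherever A returns (Pre_ = exactly the inputs on which the Python A raises no exception).

-- ===== PORT A =====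
-- the Python expression ref_lookup[i]['mapped_aln_pos'] (two dict lookups; none = KeyError)
def pvRlookup (ref_lookup : List (Int × List (String × Int))) (i : Int) : Option Int :=
  match (PySem.Dict.mk ref_lookup).get? i with
  | none => none
  | some d => (PySem.Dict.mk d).get? "mapped_aln_pos"

-- one iteration of A's inner 'for i in range(len(seq))' loop (none = an exception was raised)
def pvStepA (ref_lookup : List (Int × List (String × Int))) (valid_positions : List Int)
    (seq : List Char) (acc : Option (List Char)) (i : Int) : Option (List Char) :=
  match acc with
  | none => none
  | some aln =>
    match PySem.List.pyGet? seq i with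
    | none => none
    | some base =>
      if i ∈ valid_positions then
        match pvRlookup ref_lookup i with
        | none => none
        | some m => if m = -1 then some aln else PySem.List.pySet? aln m base
      else some aln

def create_alignment (ref_lookup : List (Int × List (String × Int))) (ref_id : String) (ref_seq : String) (seqs : List (String × String)) (valid_positions : List Int) (n_threads : Int) : List (String × String) :=
  -- aln = {ref_id: ref_seq.upper()}; ref_len = len(ref_seq); then the loop over seqs
  match seqs.foldl (fun (acc : Option (PySem.Dict String String)) p =>
    match acc with
    | none => none
    | some a =>
      match (PySem.Dict.mk seqs).get? p.1 with
      | none => none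
      | some seqStr =>
        match (PySem.List.pyRange 0 (seqStr.toList.length : Int) 1).foldl
                (pvStepA ref_lookup valid_positions seqStr.toList)
                (some (List.replicate ref_seq.toList.length '-')) with
        | none => none
        | some row => some (a.insert p.1 (String.mk row)))
    (some (PySem.Dict.insert PySem.Dict.empty ref_id (PySem.Str.upper ref_seq))) with
  | none => []          -- Pre_ excludes the raising inputs; [] is the junk value there
  | some d => d.items

-- ===== PORT B =====
-- one iteration of B's 'for i in positions' loop inside _aligned_row (after the break test)
def pvStepB (ref_lookup : List (Int × List (String × Int))) (seq : List Char)
    (acc : Option (List Char)) (i : Int) : Option (List Char) :=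
  match acc with
  | none => none
  | some cells =>
    if 0 ≤ i then
      match (PySem.Dict.mk ref_lookup).get? i with
      | none => none
      | some row =>
        match (PySem.Dict.mk row).get? "mapped_aln_pos" with
        | none => none
        | some m =>
          if m = -1 then some cells
          else
            match PySem.List.pyGet? seq i with
            | none => none
            | some base => PySem.List.pySet? cells m base
    else some cells

-- B's helper _aligned_row (none = an exception was raised)
-- 'if i >= n: break' over the sorted positions = a fold over takeWhile (i < n)
def pvAlignedRow (ref_lookup : List (Int × List (String × Int))) (positions : List Int)
    (seq : List Char) (refLen : Nat) : Option String :=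
  ((positions.takeWhile (fun i => decide (i < (seq.length : Int)))).foldl
      (pvStepB ref_lookup seq) (some (List.replicate refLen '-'))).map String.mk

def create_alignment_alt (ref_lookup : List (Int × List (String × Int))) (ref_id : String) (ref_seq : String) (seqs : List (String × String)) (valid_positions : List Int) (n_threads : Int) : List (String × String) :=
  let positions := PySem.List.sorted (PySem.Set.ofList valid_positions) (fun x => x) false
  match seqs.foldl (fun (acc : Option (PySem.Dict String String)) p =>
    match acc with
    | none => none
    | some a =>
      match (PySem.Dict.mk seqs).get? p.1 with
      | none => none
      | some s =>
        match pvAlignedRow ref_lookup positions s.toList ref_seq.toList.length with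
        | none => none
        | some r => some (a.insert p.1 r))
    (some (PySem.Dict.insert PySem.Dict.empty ref_id (PySem.Str.upper ref_seq))) with
  | none => []
  | some d => d.items

-- ===== PRECONDITION & SPEC =====
-- Pre_ = exactly the inputs where the Python A raises no exception: every position i of every
-- looked-up sequence that lies in valid_positions must find 'mapped_aln_pos' under key i of
-- ref_lookup, and the mapped position must be -1 or a valid (possibly negative, Python-wrapping)
-- index into ref_seq.
def pvOkSeq (ref_lookup : List (Int × List (String × Int))) (valid_positions : List Int)
    (refLen : Nat) (s : List Char) : Bool :=
  (List.range s.length).all (fun k =>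
    !(decide ((k : Int) ∈ valid_positions)) ||
    (match pvRlookup ref_lookup (k : Int) with
     | none => false
     | some m => m == -1 || (decide (-(refLen : Int) ≤ m) && decide (m < (refLen : Int)))))

def Pre_create_alignment (ref_lookup : List (Int × List (String × Int))) (ref_id : String) (ref_seq : String) (seqs : List (String × String)) (valid_positions : List Int) (n_threads : Int) : Prop :=
  ∀ p ∈ seqs, pvOkSeq ref_lookup valid_positions ref_seq.toList.length
      (((PySem.Dict.mk seqs).get? p.1).getD "").toList = true
instance (ref_lookup : List (Int × List (String × Int))) (ref_id : String) (ref_seq : String) (seqs : List (String × String)) (valid_positions : List Int) (n_threads : Int) : Decidable (Pre_create_alignment ref_lookup ref_id ref_seq seqs valid_positions n_threads) := by unfold Pre_create_alignment; infer_instance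

def pvWitness_create_alignment : (List (Int × List (String × Int))) × String × String × (List (String × String)) × List Int × Int :=
  ([(0, [("mapped_aln_pos", 1)]), (1, [("mapped_aln_pos", -2)])], "r", "ac", [("s", "gt")], [0, 1], 1)

def Spec_create_alignment (ref_lookup : List (Int × List (String × Int))) (ref_id : String) (ref_seq : String) (seqs : List (String × String)) (valid_positions : List Int) (n_threads : Int) (out : List (String × String)) : Prop := out = create_alignment_alt ref_lookup ref_id ref_seq seqs valid_positions n_threads
instance (ref_lookup : List (Int × List (String × Int))) (ref_id : String) (ref_seq : String) (seqs : List (String × String)) (valid_positions : List Int) (n_threads : Int) (out : List (String × String)) : Decidable (Spec_create_alignment ref_lookup ref_id ref_seq seqs valid_positions n_threads out) := by unfold Spec_create_alignment; infer_instance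

-- ===== CLAIM (what is proved, stated in full; the proofs are below) =====
def Claim_equal_create_alignment : Prop := ∀ (ref_lookup : List (Int × List (String × Int))) (ref_id : String) (ref_seq : String) (seqs : List (String × String)) (valid_positions : List Int) (n_threads : Int), Dom_create_alignment ref_lookup ref_id ref_seq seqs valid_positions n_threads → Pre_create_alignment ref_lookup ref_id ref_seq seqs valid_positions n_threads → Spec_create_alignment ref_lookup ref_id ref_seq seqs valid_positions n_threads (create_alignment ref_lookup ref_id ref_seq seqs valid_positions n_threads)

-- ===== LEMMAS AND PROOFS =====

-- dropping the skipped iterations of a fold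
theorem pv_foldl_filter {α : Type} (f : Option α → Int → Option α) (p : Int → Bool) (l : List Int)
    (h : ∀ a, ∀ i ∈ l, p i = false → f a i = a) (init : Option α) :
    l.foldl f init = (l.filter p).foldl f init := by
  induction l generalizing init with
  | nil => rfl
  | cons x t ih =>
    by_cases hx : p x
    · simp only [List.foldl_cons, List.filter_cons, hx, if_pos rfl]
      exact ih (fun a i hi => h a i (by simp [hi])) _
    · rw [List.foldl_cons, List.filter_cons, h init x (by simp) (by simpa using hx)]
      simp only [Bool.false_eq_true] at hx
      simp only [hx, if_false]
      exact ih (fun a i hi => h a i (by simp [hi])) _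

-- A's step is the identity on in-range indices outside valid_positions
theorem pvStepA_skip (ref_lookup : List (Int × List (String × Int))) (valid_positions : List Int)
    (seq : List Char) (a : Option (List Char)) (k : Nat) (hk : k < seq.length)
    (hv : ((k : Int) ∈ valid_positions) = False) :
    pvStepA ref_lookup valid_positions seq a (k : Int) = a := by
  cases a with
  | none => rfl
  | some aln =>
    simp only [pvStepA, PySem.List.pyGet?_natCast, List.getElem?_eq_getElem hk]
    rw [if_neg (by simp [hv])]

-- B's step is the identity on negative indices
theorem pvStepB_skip (ref_lookup : List (Int × List (String × Int))) (seq : List Char)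
    (a : Option (List Char)) (i : Int) (hi : ¬ 0 ≤ i) :
    pvStepB ref_lookup seq a i = a := by
  cases a with
  | none => rfl
  | some cells => simp only [pvStepB, if_neg hi]

-- on a strictly increasing list, the break at the first i ≥ c keeps exactly the i < c
theorem pv_takeWhile_lt {l : List Int} (h : l.Pairwise (· < ·)) (c : Int) :
    l.takeWhile (fun i => decide (i < c)) = l.filter (fun i => decide (i < c)) := by
  induction l with
  | nil => rfl
  | cons a t ih =>
    by_cases ha : a < c
    · simp [List.takeWhile_cons, List.filter_cons, ha, ih (List.pairwise_cons.mp h).2]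
    · have hta : ∀ x ∈ t, a < x := (List.pairwise_cons.mp h).1
      have : t.filter (fun i => decide (i < c)) = [] := by
        rw [List.filter_eq_nil_iff]
        intro x hx
        have := hta x hx
        simp only [decide_eq_true_eq]
        omega
      simp [List.takeWhile_cons, List.filter_cons, ha, this]

-- on an in-range position of valid_positions the two steps agree
theorem pvStep_eq (ref_lookup : List (Int × List (String × Int))) (valid_positions : List Int)
    (seq : List Char) (a : Option (List Char)) (i : Int)
    (hr : 0 ≤ i ∧ i < (seq.length : Int)) (hv : i ∈ valid_positions) :
    pvStepA ref_lookup valid_positions seq a i = pvStepB ref_lookup seq a i := by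
  cases a with
  | none => rfl
  | some aln =>
    obtain ⟨k, rfl⟩ : ∃ k : Nat, i = (k : Int) := ⟨i.toNat, by omega⟩
    have hk : k < seq.length := by exact_mod_cast hr.2
    simp only [pvStepA, pvStepB, pvRlookup, PySem.List.pyGet?_natCast,
      List.getElem?_eq_getElem hk, if_pos hv, if_pos hr.1]
    cases (PySem.Dict.mk ref_lookup).get? (k : Int) with
    | none => rfl
    | some d =>
      cases (PySem.Dict.mk d).get? "mapped_aln_pos" with
      | none => rfl
      | some m => by_cases hm : m = -1 <;> simp [hm]

-- two strictly increasing Int lists with the same members are equal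
theorem pv_eq_of_pairwise_lt {l1 l2 : List Int}
    (h1 : l1.Pairwise (· < ·)) (h2 : l2.Pairwise (· < ·))
    (hm : ∀ x, x ∈ l1 ↔ x ∈ l2) : l1 = l2 := by
  induction l1 generalizing l2 with
  | nil =>
    cases l2 with
    | nil => rfl
    | cons b u => exact absurd ((hm b).mpr (by simp)) (by simp)
  | cons a t ih =>
    cases l2 with
    | nil => exact absurd ((hm a).mp (by simp)) (by simp)
    | cons b u =>
      have hat : ∀ x ∈ t, a < x := fun x hx => (List.pairwise_cons.mp h1).1 x hx
      have hbu : ∀ x ∈ u, b < x := fun x hx => (List.pairwise_cons.mp h2).1 x hx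
      have hab : a = b := by
        have h1' := (hm a).mp (by simp)
        have h2' := (hm b).mpr (by simp)
        rcases List.mem_cons.mp h1' with h | h
        · exact h
        · rcases List.mem_cons.mp h2' with h' | h'
          · omega
          · have := hat b h'; have := hbu a h; omega
      subst hab
      have htu : ∀ x, x ∈ t ↔ x ∈ u := by
        intro x
        constructor
        · intro hx
          have hax := hat x hx
          rcases List.mem_cons.mp ((hm x).mp (by simp [hx])) with h | h
          · omega
          · exact h
        · intro hx
          have hax := hbu x hx
          rcases List.mem_cons.mp ((hm x).mpr (by simp [hx])) with h | h
          · omega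
          · exact h
      rw [ih (List.pairwise_cons.mp h1).2 (List.pairwise_cons.mp h2).2 htu]

-- the index list A effectively processes = the index list B effectively processes
theorem pv_lists_eq (valid_positions : List Int) (n : Nat) :
    (PySem.List.pyRange 0 (n : Int) 1).filter (fun i => decide (i ∈ valid_positions)) =
    (PySem.List.sorted (PySem.Set.ofList valid_positions) (fun x => x) false).filter
      (fun i => decide (0 ≤ i ∧ i < (n : Int))) := by
  apply pv_eq_of_pairwise_lt
  · apply List.Pairwise.filter
    rw [PySem.List.pyRange_zero_natCast]
    exact List.pairwise_lt_range.map _ (by intro a b h; exact_mod_cast h)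
  · exact (PySem.List.sorted_ofList_pairwise_lt valid_positions).filter _
  · intro x
    simp only [List.mem_filter, PySem.List.pyRange_zero_natCast, List.mem_map, List.mem_range,
      PySem.List.mem_sorted, PySem.Set.mem_ofList, decide_eq_true_eq]
    constructor
    · rintro ⟨⟨k, hk, rfl⟩, hv⟩
      exact ⟨hv, by omega, by exact_mod_cast hk⟩
    · rintro ⟨hv, h0, hn⟩
      exact ⟨⟨x.toNat, by omega, by omega⟩, hv⟩

-- the two inner loops produce the same Option row
theorem pv_row_eq (ref_lookup : List (Int × List (String × Int))) (valid_positions : List Int)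
    (refLen : Nat) (seq : List Char) :
    (PySem.List.pyRange 0 (seq.length : Int) 1).foldl
        (pvStepA ref_lookup valid_positions seq) (some (List.replicate refLen '-')) =
    ((PySem.List.sorted (PySem.Set.ofList valid_positions) (fun x => x) false).takeWhile
        (fun i => decide (i < (seq.length : Int)))).foldl
        (pvStepB ref_lookup seq) (some (List.replicate refLen '-')) := by
  have hA := pv_foldl_filter (pvStepA ref_lookup valid_positions seq)
      (fun i => decide (i ∈ valid_positions)) (PySem.List.pyRange 0 (seq.length : Int) 1)
      (by
        intro a i hi hp
        rw [PySem.List.pyRange_zero_natCast] at hi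
        obtain ⟨k, hk, rfl⟩ := by simpa using hi
        exact pvStepA_skip _ _ _ _ k hk (by simpa using hp))
      (some (List.replicate refLen '-'))
  have hB := pv_foldl_filter (pvStepB ref_lookup seq)
      (fun i => decide (0 ≤ i))
      ((PySem.List.sorted (PySem.Set.ofList valid_positions) (fun x => x) false).takeWhile
        (fun i => decide (i < (seq.length : Int))))
      (by
        intro a i _ hp
        exact pvStepB_skip _ _ _ i (by simpa using hp))
      (some (List.replicate refLen '-'))
  have hT : ((PySem.List.sorted (PySem.Set.ofList valid_positions) (fun x => x) false).takeWhile
        (fun i => decide (i < (seq.length : Int)))).filter (fun i => decide (0 ≤ i)) =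
      (PySem.List.sorted (PySem.Set.ofList valid_positions) (fun x => x) false).filter
        (fun i => decide (0 ≤ i ∧ i < (seq.length : Int))) := by
    rw [pv_takeWhile_lt (PySem.List.sorted_ofList_pairwise_lt valid_positions),
        List.filter_filter]
    apply List.filter_congr
    intro i _
    by_cases h0 : 0 ≤ i <;> by_cases h1 : i < (seq.length : Int) <;> simp [h0, h1]
  rw [hA, hB, hT, pv_lists_eq valid_positions seq.length]
  apply PySem.List.foldl_congr_mem'
  · intro i hi a
    have h := (List.mem_filter.mp hi).2
    simp only [decide_eq_true_eq] at h
    have hv : i ∈ valid_positions := by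
      have := (List.mem_filter.mp hi).1
      simpa [PySem.List.mem_sorted, PySem.Set.mem_ofList] using this
    exact pvStep_eq ref_lookup valid_positions seq a i h hv

-- the two outer folds over seqs agree (the loop bodies coincide after pv_row_eq)
theorem pv_outer (ref_lookup : List (Int × List (String × Int))) (valid_positions : List Int)
    (refLen : Nat) (seqs ss : List (String × String)) (a : Option (PySem.Dict String String)) :
    ss.foldl (fun (acc : Option (PySem.Dict String String)) p =>
      match acc with
      | none => none
      | some a =>
        match (PySem.Dict.mk seqs).get? p.1 with
        | none => none
        | some seqStr =>
          match (PySem.List.pyRange 0 (seqStr.toList.length : Int) 1).foldl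
                  (pvStepA ref_lookup valid_positions seqStr.toList)
                  (some (List.replicate refLen '-')) with
          | none => none
          | some row => some (a.insert p.1 (String.mk row))) a
    =
    ss.foldl (fun (acc : Option (PySem.Dict String String)) p =>
      match acc with
      | none => none
      | some a =>
        match (PySem.Dict.mk seqs).get? p.1 with
        | none => none
        | some s =>
          match pvAlignedRow ref_lookup
                  (PySem.List.sorted (PySem.Set.ofList valid_positions) (fun x => x) false)
                  s.toList refLen with
          | none => none
          | some r => some (a.insert p.1 r)) a := by
  apply PySem.List.foldl_congr_mem'
  intro p _ acc
  cases acc with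
  | none => rfl
  | some d =>
    simp only
    cases (PySem.Dict.mk seqs).get? p.1 with
    | none => rfl
    | some s =>
      simp only [pvAlignedRow, pv_row_eq ref_lookup valid_positions refLen s.toList]
      cases ((PySem.List.sorted (PySem.Set.ofList valid_positions) (fun x => x) false).takeWhile
        (fun i => decide (i < (s.toList.length : Int)))).foldl
        (pvStepB ref_lookup s.toList) (some (List.replicate refLen '-')) with
      | none => rfl
      | some cells => rfl

-- ===== VERDICT (by name: the statement is the Claim_ definition above) =====
theorem create_alignment_spec : Claim_equal_create_alignment := by
  intro ref_lookup ref_id ref_seq seqs valid_positions n_threads _ _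
  unfold Spec_create_alignment create_alignment create_alignment_alt
  rw [pv_outer ref_lookup valid_positions ref_seq.toList.length seqs seqs]
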